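-- pv_equiv track=rewrite | github.com/liziwl/CS306-Data-Mining | ams_algo.py | est_surprise_num
-- ===== SOURCE A (Python) =====
-- def est_surprise_num(data):
--     x = [0 for i in range(len(data))]
--     next = dict()
--     for i in range(len(data) - 1, -1, -1):
--         if data[i] not in next:
--             next[data[i]] = i
--             x[i] = 1
--         else:
--             x[i] = x[next[data[i]]] + 1
--             next[data[i]] = i
--     return x
-- ===== SOURCE B (Python) =====
-- def est_surprise_num(data):
--     # Two-phase: full frequency table first, then one forward scan that
--     # reads the remaining count and decrements it.
--     counts = {}
--     for v in data:
--         counts[v] = counts.get(v, 0) + 1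
--     x = []
--     for v in data:
--         x.append(counts[v])
--         counts[v] = counts[v] - 1
--     return x
-- ===== Notes on version B (the rewrite author's own statement) =====
-- stated objective: alternative
-- what changed: Replaces A's single backward pass that chains each position to the next occurrence via a 'next' index dict with a two-phase scheme: build a complete frequency table of the list first, then a forward scan that emits the remaining count of each element and decrements it.
import Mathlib
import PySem

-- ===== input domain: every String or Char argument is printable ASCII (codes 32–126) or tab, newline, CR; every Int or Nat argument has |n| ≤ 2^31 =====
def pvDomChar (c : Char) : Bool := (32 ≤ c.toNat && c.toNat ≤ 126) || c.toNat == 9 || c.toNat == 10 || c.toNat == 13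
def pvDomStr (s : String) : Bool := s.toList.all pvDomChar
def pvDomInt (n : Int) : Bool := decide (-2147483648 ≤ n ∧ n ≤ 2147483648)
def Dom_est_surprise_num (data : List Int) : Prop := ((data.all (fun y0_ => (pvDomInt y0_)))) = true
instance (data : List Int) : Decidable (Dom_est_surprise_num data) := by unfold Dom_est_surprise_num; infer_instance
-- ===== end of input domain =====

-- B replaces A's backward pass with a next-occurrence index dict by a frequency table
-- plus a forward decrementing scan (alternative decomposition, same O(n) cost).

-- ===== PORT A =====
-- A's loop body; every data[i] read, x[i] write and x[next[data[i]]] read is in range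
-- (i ranges over range(len(data)-1,-1,-1) and next stores such indices), so pyGetD/pySetD are exact here.
def stepA (data : List Int) (s : List Int × PySem.Dict Int Int) (i : Int) :
    List Int × PySem.Dict Int Int :=
  match s.2.get? (PySem.List.pyGetD data i 0) with
  | none =>                                             -- if data[i] not in next:
      (PySem.List.pySetD s.1 i 1,                       --   x[i] = 1
       s.2.insert (PySem.List.pyGetD data i 0) i)       --   next[data[i]] = i
  | some j =>                                           -- else:
      (PySem.List.pySetD s.1 i (PySem.List.pyGetD s.1 j 0 + 1),  -- x[i] = x[next[data[i]]] + 1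
       s.2.insert (PySem.List.pyGetD data i 0) i)       --   next[data[i]] = i

def est_surprise_num (data : List Int) : List Int :=
  -- x = [0 for i in range(len(data))]
  let x := (PySem.List.pyRange 0 (data.length : Int) 1).map (fun _ => (0 : Int))
  -- for i in range(len(data) - 1, -1, -1): …
  ((PySem.List.pyRange ((data.length : Int) - 1) (-1) (-1)).foldl (stepA data)
    (x, PySem.Dict.empty)).1

-- ===== PORT B =====
def est_surprise_num_alt (data : List Int) : List Int :=
  -- counts = {}; for v in data: counts[v] = counts.get(v, 0) + 1
  let counts := data.foldl (fun (d : PySem.Dict Int Int) v => d.insert v (d.getD v 0 + 1))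
    PySem.Dict.empty
  -- x = []; for v in data: x.append(counts[v]); counts[v] = counts[v] - 1
  -- (counts[v] is always present, so getD is exact)
  ((data.foldl (fun (s : PySem.Dict Int Int × List Int) v =>
      (s.1.insert v (s.1.getD v 0 - 1), s.2 ++ [s.1.getD v 0])) (counts, ([] : List Int))).2)

-- ===== PRECONDITION & SPEC =====
def Spec_est_surprise_num (data : List Int) (out : List Int) : Prop := out = est_surprise_num_alt data
instance (data : List Int) (out : List Int) : Decidable (Spec_est_surprise_num data out) := by unfold Spec_est_surprise_num; infer_instance

-- ===== CLAIM (what is proved, stated in full; the proofs are below) =====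
def Claim_equal_est_surprise_num : Prop := ∀ (data : List Int), Dom_est_surprise_num data → Spec_est_surprise_num data (est_surprise_num data)

-- ===== LEMMAS AND PROOFS =====

-- The mathematical description of the result: entry i is the number of
-- occurrences of data[i] in data[i:].
def suffCounts : List Int → List Int
  | [] => []
  | v :: rest => ((rest.count v : Int) + 1) :: suffCounts rest

theorem length_suffCounts (l : List Int) : (suffCounts l).length = l.length := by
  induction l with
  | nil => rfl
  | cons v rest ih => simp [suffCounts, ih]

theorem alt_loop (l : List Int) : ∀ (d : PySem.Dict Int Int) (acc : List Int),
    (∀ w : Int, d.getD w 0 = (l.count w : Int)) →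
    (l.foldl (fun (s : PySem.Dict Int Int × List Int) v =>
        (s.1.insert v (s.1.getD v 0 - 1), s.2 ++ [s.1.getD v 0])) (d, acc)).2
      = acc ++ suffCounts l := by
  induction l with
  | nil => intro d acc _; simp [suffCounts]
  | cons v rest ih =>
    intro d acc hd
    have hv : d.getD v 0 = (rest.count v : Int) + 1 := by
      rw [hd v]; simp
    simp only [List.foldl_cons]
    rw [ih _ _ (by
      intro w
      rw [PySem.Dict.getD_insert]
      by_cases hw : w = v
      · subst hw; simp [hv]
      · simp [hd w, hw, Ne.symm hw])]
    simp [suffCounts, hv, List.append_assoc]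

theorem set_boundary {T : Type} (a : List T) (b v : T) (r : List T) :
    (a ++ b :: r).set a.length v = a ++ v :: r := by
  induction a with
  | nil => rfl
  | cons h t ih => simp [ih]

theorem A_loop (data : List Int) : ∀ (k : Nat), k ≤ data.length →
    ∀ (x : List Int) (d : PySem.Dict Int Int),
    x = List.replicate k 0 ++ suffCounts (data.drop k) →
    (∀ w : Int, d.get? w = none → (data.drop k).count w = 0) →
    (∀ w : Int, ∀ j, d.get? w = some j →
       ∃ m : Nat, j = (m : Int) ∧ k ≤ m ∧ m < data.length ∧
         x[m]? = some (((data.drop k).count w : Int))) →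
    ((PySem.List.pyRange ((k : Int) - 1) (-1) (-1)).foldl (stepA data) (x, d)).1
      = suffCounts data := by
  intro k
  induction k with
  | zero =>
    intro _ x d hx _ _
    rw [PySem.List.pyRange_neg_one_eq_nil (by norm_num)]
    simpa using hx
  | succ k ih =>
    intro hk x d hx hnone hsome
    have hklt : k < data.length := by omega
    have hdrop : data.drop k = data[k] :: data.drop (k + 1) :=
      List.drop_eq_getElem_cons hklt
    have hgetd : PySem.List.pyGetD data (k : Int) 0 = data[k] := by
      rw [PySem.List.pyGetD_natCast]
      simp [List.getD_eq_getElem?_getD, hklt]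
    have hcast : (((k + 1 : Nat) : Int) - 1) = (k : Int) := by push_cast; ring
    rw [hcast, PySem.List.pyRange_neg_one_cons (by omega), List.foldl_cons]
    -- the new x after the write at position k, in both branches
    have hxlen : x.length = data.length := by
      rw [hx]; simp [length_suffCounts]; omega
    have hxk : ∀ val : Int, x.set k val
        = List.replicate k 0 ++ val :: suffCounts (data.drop (k + 1)) := by
      intro val
      have h := set_boundary (List.replicate (α := Int) k 0) 0 val
        (suffCounts (data.drop (k + 1)))
      simp only [List.length_replicate] at h
      rw [hx, List.replicate_succ', List.append_assoc, List.singleton_append, h]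
    -- the new count at the head
    have hcnt : (data.drop k).count data[k]
        = (data.drop (k + 1)).count data[k] + 1 := by
      rw [hdrop, List.count_cons]; simp
    -- invariant maintenance, shared by both branches
    have hmain : ∀ val : Int,
        val = ((data.drop k).count data[k] : Int) →
        ((PySem.List.pyRange ((k : Int) - 1) (-1) (-1)).foldl (stepA data)
          (x.set k val, d.insert data[k] (k : Int))).1 = suffCounts data := by
      intro val hval
      apply ih (by omega)
      · rw [hxk val, hval, hcnt, hdrop]; simp [suffCounts]
      · intro w hw
        rw [PySem.Dict.get?_insert] at hw
        by_cases hwv : w = data[k]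
        · simp [hwv] at hw
        · simp [hwv] at hw
          rw [hdrop, List.count_cons]
          simp [hnone w hw, Ne.symm hwv]
      · intro w j hw
        rw [PySem.Dict.get?_insert] at hw
        by_cases hwv : w = data[k]
        · refine ⟨k, ?_, le_refl _, hklt, ?_⟩
          · simp [hwv] at hw; omega
          · rw [List.getElem?_set_eq_of_lt val (by omega), hwv, ← hval]
        · simp [hwv] at hw
          obtain ⟨m, hj, hkm, hmn, hxm⟩ := hsome w j hw
          refine ⟨m, hj, by omega, hmn, ?_⟩
          rw [List.getElem?_set_of_lt' val x (by omega), if_neg (by omega), hxm,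
            hdrop, List.count_cons]
          simp [Ne.symm hwv]
    -- evaluate one step
    show ((PySem.List.pyRange ((k : Int) - 1) (-1) (-1)).foldl (stepA data)
      (stepA data (x, d) (k : Int))).1 = suffCounts data
    unfold stepA
    rw [hgetd]
    rcases hcase : d.get? data[k] with _ | j
    · simp only
      rw [PySem.List.pySetD_natCast]
      apply hmain
      have h0 := hnone data[k] hcase
      rw [hcnt, h0]; simp
    · simp only
      obtain ⟨m, hj, hkm, hmn, hxm⟩ := hsome data[k] j hcase
      rw [PySem.List.pySetD_natCast]
      have hread : PySem.List.pyGetD x j 0 = ((data.drop (k + 1)).count data[k] : Int) := by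
        rw [hj, PySem.List.pyGetD_natCast, List.getD_eq_getElem?_getD, hxm]; rfl
      rw [hread]
      apply hmain
      rw [hcnt]; push_cast; ring

theorem A_eq (data : List Int) : est_surprise_num data = suffCounts data := by
  unfold est_surprise_num
  have hx : (PySem.List.pyRange 0 (data.length : Int) 1).map (fun _ => (0 : Int))
      = List.replicate data.length 0 ++ suffCounts (data.drop data.length) := by
    simp [List.map_const', PySem.List.length_pyRange_one, suffCounts]
  rw [hx]
  apply A_loop data data.length (le_refl _) _ _ rfl
  · intro w _; simp
  · intro w j hw; simp [PySem.Dict.get?_empty] at hw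

theorem B_eq (data : List Int) : est_surprise_num_alt data = suffCounts data := by
  unfold est_surprise_num_alt
  have h := alt_loop data
    (data.foldl (fun (d : PySem.Dict Int Int) v => d.insert v (d.getD v 0 + 1)) PySem.Dict.empty)
    [] (by intro w; rw [PySem.Dict.getD_foldl_insert_add_one]; simp)
  simpa using h

-- ===== VERDICT (by name: the statement is the Claim_ definition above) =====
theorem est_surprise_num_spec : Claim_equal_est_surprise_num := by
  intro data _
  unfold Spec_est_surprise_num
  rw [A_eq, B_eq]
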